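-- pv_equiv track=rewrite | github.com/osmanmx/mcell | libmcell/generator/gen.py | yaml_type_to_cpp_type
-- ===== SOURCE A (Python) =====
-- YAML_TYPE_FLOAT = 'float'
--
-- YAML_TYPE_STR = 'str'
--
-- YAML_TYPE_INT = 'int'
--
-- YAML_TYPE_LONG = 'long'
--
-- YAML_TYPE_VEC2 = 'Vec2'
--
-- YAML_TYPE_VEC3 = 'Vec3'
--
-- YAML_TYPE_IVEC3 = 'IVec3'
--
-- YAML_TYPE_LIST = 'List'
--
-- CPP_TYPE_FLOAT = 'float_t'
--
-- CPP_TYPE_STR = 'std::string'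
--
-- CPP_TYPE_INT = 'int'
--
-- CPP_TYPE_LONG = 'long'
--
-- CPP_TYPE_BOOL = 'bool'
--
-- CPP_TYPE_VEC2 = 'Vec2'
--
-- CPP_TYPE_VEC3 = 'Vec3'
--
-- CPP_TYPE_IVEC3 = 'IVec3'
--
-- CPP_VECTOR_TYPE = 'std::vector'
--
-- SHARED_PTR = 'std::shared_ptr'
--
-- def is_list(t):
--     return t.startswith(YAML_TYPE_LIST)
--
-- def get_inner_list_type(t):
--     if is_list(t):
--         return t[len(YAML_TYPE_LIST)+1:-1]
--     else:
--         return t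
--
-- def is_yaml_ptr_type(t):
--     return t[-1] == '*'
--
-- def yaml_type_to_cpp_type(t):
--     assert len(t) >= 1
--     if t == YAML_TYPE_FLOAT:
--         return CPP_TYPE_FLOAT
--     elif t == YAML_TYPE_STR:
--         return CPP_TYPE_STR
--     elif t == YAML_TYPE_INT:
--         return CPP_TYPE_INT
--     elif t == YAML_TYPE_LONG:
--         return CPP_TYPE_LONG
--     elif t == YAML_TYPE_LONG:
--         return CPP_TYPE_BOOL
--     elif t == YAML_TYPE_VEC2:
--         return CPP_TYPE_VEC2
--     elif t == YAML_TYPE_VEC3: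
--         return CPP_TYPE_VEC3
--     elif t == YAML_TYPE_IVEC3:
--         return CPP_TYPE_IVEC3
--     elif is_list(t):
--         assert len(t) > 7
--         inner_type = yaml_type_to_cpp_type(get_inner_list_type(t))
--         return CPP_VECTOR_TYPE + '<' + inner_type + '>'
--     else:
--         if is_yaml_ptr_type(t):
--             return SHARED_PTR + '<' + t[0:-1] + '>'
--         else:
--             return t # standard ttype
-- ===== SOURCE B (Python) =====
-- _SCALAR = {
--     'float': 'float_t',
--     'str': 'std::string',
--     'int': 'int',
--     'long': 'long',
--     'Vec2': 'Vec2',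
--     'Vec3': 'Vec3',
--     'IVec3': 'IVec3',
-- }
--
--
-- def yaml_type_to_cpp_type(t):
--     assert len(t) >= 1
--     depth = 0
--     while t.startswith('List'):
--         assert len(t) > 7
--         t = t[5:-1]
--         depth += 1
--     core = _SCALAR.get(t)
--     if core is None:
--         core = 'std::shared_ptr<' + t[:-1] + '>' if t[-1] == '*' else t
--     return 'std::vector<' * depth + core + '>' * depth
-- ===== Notes on version B (the rewrite author's own statement) =====
-- stated objective: idiomatic
-- what changed: The eight-way elif equality cascade becomes one dict table lookup, and A's recursive List handling becomes an iterative peel loop that counts nesting depth and wraps the mapped core once with depth-many std::vector< .. > layers.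
import Mathlib
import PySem

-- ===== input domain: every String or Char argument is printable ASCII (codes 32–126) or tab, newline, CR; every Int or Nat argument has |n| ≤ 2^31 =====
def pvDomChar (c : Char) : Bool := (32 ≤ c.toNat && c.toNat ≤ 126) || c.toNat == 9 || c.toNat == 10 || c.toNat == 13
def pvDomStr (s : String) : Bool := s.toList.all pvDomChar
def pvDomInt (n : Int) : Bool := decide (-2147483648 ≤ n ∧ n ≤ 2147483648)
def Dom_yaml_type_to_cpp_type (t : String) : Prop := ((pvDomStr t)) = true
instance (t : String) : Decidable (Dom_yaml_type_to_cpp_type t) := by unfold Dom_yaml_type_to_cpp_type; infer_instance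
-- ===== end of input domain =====

-- B replaces A's elif cascade by a dict table and A's recursion by an iterative
-- depth-counting peel loop; equal return values wherever the Python A returns.

-- termination helper, cited by the ports' decreasing_by
lemma pvSliceLen_lt (cs : List Char) (h : PySem.Chars.startswith cs "List".toList = true) :
    (PySem.Chars.slice cs (some 5) (some (-1))).length < cs.length := by
  have hp : ("List".toList : List Char) <+: cs := (PySem.Chars.startswith_iff _ _).mp h
  have h4 : 4 ≤ cs.length := by simpa using hp.length_le
  simp [PySem.Chars.slice_eq_listSlice, PySem.List.length_slice]
  omega

-- ===== PORT A =====
-- is_list(t)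
def pvIsList (cs : List Char) : Bool := PySem.Chars.startswith cs "List".toList

-- get_inner_list_type(t)
def pvInner (cs : List Char) : List Char :=
  if pvIsList cs then PySem.Chars.slice cs (some 5) (some (-1)) else cs

-- is_yaml_ptr_type(t): t[-1] == '*'
def pvIsPtr (cs : List Char) : Bool := PySem.Chars.pyGet? cs (-1) == some '*'

def pvYamlA : List Char → List Char
  | cs =>
    if cs = "float".toList then "float_t".toList
    else if cs = "str".toList then "std::string".toList
    else if cs = "int".toList then "int".toList
    else if cs = "long".toList then "long".toList
    else if cs = "long".toList then "bool".toList   -- A's unreachable duplicate branch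
    else if cs = "Vec2".toList then "Vec2".toList
    else if cs = "Vec3".toList then "Vec3".toList
    else if cs = "IVec3".toList then "IVec3".toList
    else if _h : pvIsList cs then
      "std::vector<".toList ++ pvYamlA (pvInner cs) ++ ">".toList
    else if pvIsPtr cs then
      "std::shared_ptr<".toList ++ PySem.Chars.slice cs (some 0) (some (-1)) ++ ">".toList
    else cs
  termination_by cs => cs.length
  decreasing_by
    simp only [pvInner, pvIsList] at _h ⊢
    rw [if_pos _h]
    exact pvSliceLen_lt _ _h

def yaml_type_to_cpp_type (t : String) : String := String.ofList (pvYamlA t.toList)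

-- ===== PORT B =====
-- the module-level _SCALAR dict
def pvTable : PySem.Dict (List Char) (List Char) :=
  PySem.Dict.ofList
    [("float".toList, "float_t".toList), ("str".toList, "std::string".toList),
     ("int".toList, "int".toList), ("long".toList, "long".toList),
     ("Vec2".toList, "Vec2".toList), ("Vec3".toList, "Vec3".toList),
     ("IVec3".toList, "IVec3".toList)]

-- the while loop: peel list wrappers, counting depth
def pvPeel : List Char → List Char × Nat
  | cs =>
    if h : PySem.Chars.startswith cs "List".toList then
      let p := pvPeel (PySem.Chars.slice cs (some 5) (some (-1)))
      (p.1, p.2 + 1)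
    else (cs, 0)
  termination_by cs => cs.length
  decreasing_by exact pvSliceLen_lt cs h

def pvYamlB (cs : List Char) : List Char :=
  let p := pvPeel cs
  let core : List Char :=
    match PySem.Dict.get? pvTable p.1 with
    | some v => v
    | none =>
      if PySem.Chars.pyGet? p.1 (-1) == some '*' then
        "std::shared_ptr<".toList ++ PySem.Chars.slice p.1 (some 0) (some (-1)) ++ ">".toList
      else p.1
  (List.replicate p.2 "std::vector<".toList).flatten ++ core ++ List.replicate p.2 '>'

def yaml_type_to_cpp_type_alt (t : String) : String := String.ofList (pvYamlB t.toList)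

-- ===== PRECONDITION & SPEC =====
-- pvPeelK cs k: the string after stripping k list-wrapper decorations (drop the first 5
-- and the last character, k times) — a plain shape iterator, not either port's code.
def pvPeelK (cs : List Char) : Nat → List Char
  | 0 => cs
  | k + 1 => ((pvPeelK cs k).drop 5).dropLast

-- Python A returns normally exactly on nonempty strings whose List-prefixed layers are
-- each at least 8 characters long (room for the wrapper decoration); elsewhere its
-- asserts raise AssertionError, and B's identical asserts raise there too.
def Pre_yaml_type_to_cpp_type (t : String) : Prop :=
  t.toList ≠ [] ∧ ∀ k < t.toList.length,
    (∀ j < k + 1, ("List".toList : List Char) <+: pvPeelK t.toList j) →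
    7 < (pvPeelK t.toList k).length
instance (t : String) : Decidable (Pre_yaml_type_to_cpp_type t) := by
  unfold Pre_yaml_type_to_cpp_type; infer_instance

def pvWitness_yaml_type_to_cpp_type : String := "List[float]"

def Spec_yaml_type_to_cpp_type (t : String) (out : String) : Prop := out = yaml_type_to_cpp_type_alt t
instance (t : String) (out : String) : Decidable (Spec_yaml_type_to_cpp_type t out) := by
  unfold Spec_yaml_type_to_cpp_type; infer_instance

-- ===== CLAIM (what is proved, stated in full; the proofs are below) =====
def Claim_equal_yaml_type_to_cpp_type : Prop := ∀ (t : String), Dom_yaml_type_to_cpp_type t → Pre_yaml_type_to_cpp_type t → Spec_yaml_type_to_cpp_type t (yaml_type_to_cpp_type t)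

-- ===== LEMMAS AND PROOFS =====

lemma pvWrapSucc (P core : List Char) (c : Char) (d : Nat) :
    (List.replicate (d + 1) P).flatten ++ core ++ List.replicate (d + 1) c
      = P ++ ((List.replicate d P).flatten ++ core ++ List.replicate d c) ++ [c] := by
  rw [List.replicate_succ, List.flatten_cons, List.replicate_succ' (n := d)]
  simp [List.append_assoc]

lemma pvTable_items : pvTable.items =
    [(['f','l','o','a','t'], ['f','l','o','a','t','_','t']),
     (['s','t','r'], ['s','t','d',':',':','s','t','r','i','n','g']),
     (['i','n','t'], ['i','n','t']), (['l','o','n','g'], ['l','o','n','g']),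
     (['V','e','c','2'], ['V','e','c','2']), (['V','e','c','3'], ['V','e','c','3']),
     (['I','V','e','c','3'], ['I','V','e','c','3'])] := by decide

-- the non-'List' case: A's constant cascade agrees with B's table lookup / pointer fallback
lemma pvBase (cs : List Char) (hL : PySem.Chars.startswith cs "List".toList = false) :
    pvYamlA cs = pvYamlB cs := by
  have hLl : PySem.Chars.startswith cs ['L','i','s','t'] = false := hL
  have hpeel : pvPeel cs = (cs, 0) := by rw [pvPeel.eq_def]; simp [hLl]
  have hBv : pvYamlB cs =
      match PySem.Dict.get? pvTable cs with
      | some v => v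
      | none =>
        if PySem.Chars.pyGet? cs (-1) == some '*' then
          "std::shared_ptr<".toList ++ PySem.Chars.slice cs (some 0) (some (-1)) ++ ">".toList
        else cs := by
    simp only [pvYamlB, hpeel]
    simp
  by_cases h1 : cs = "float".toList
  · subst h1; rw [pvYamlA.eq_def, hBv]; decide
  by_cases h2 : cs = "str".toList
  · subst h2; rw [pvYamlA.eq_def, hBv]; decide
  by_cases h3 : cs = "int".toList
  · subst h3; rw [pvYamlA.eq_def, hBv]; decide
  by_cases h4 : cs = "long".toList
  · subst h4; rw [pvYamlA.eq_def, hBv]; decide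
  by_cases h5 : cs = "Vec2".toList
  · subst h5; rw [pvYamlA.eq_def, hBv]; decide
  by_cases h6 : cs = "Vec3".toList
  · subst h6; rw [pvYamlA.eq_def, hBv]; decide
  by_cases h7 : cs = "IVec3".toList
  · subst h7; rw [pvYamlA.eq_def, hBv]; decide
  -- default / pointer branch: the table lookup misses
  have hnone : PySem.Dict.get? pvTable cs = none := by
    simp [PySem.Dict.get?]
    intro a b hmem
    rw [pvTable_items] at hmem
    simp at hmem
    rcases hmem with ⟨ha,_⟩|⟨ha,_⟩|⟨ha,_⟩|⟨ha,_⟩|⟨ha,_⟩|⟨ha,_⟩|⟨ha,_⟩ <;> subst ha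
    · exact fun he => h1 he.symm
    · exact fun he => h2 he.symm
    · exact fun he => h3 he.symm
    · exact fun he => h4 he.symm
    · exact fun he => h5 he.symm
    · exact fun he => h6 he.symm
    · exact fun he => h7 he.symm
  have h1l : cs ≠ ['f','l','o','a','t'] := h1
  have h2l : cs ≠ ['s','t','r'] := h2
  have h3l : cs ≠ ['i','n','t'] := h3
  have h4l : cs ≠ ['l','o','n','g'] := h4
  have h5l : cs ≠ ['V','e','c','2'] := h5
  have h6l : cs ≠ ['V','e','c','3'] := h6
  have h7l : cs ≠ ['I','V','e','c','3'] := h7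
  rw [pvYamlA.eq_def, hBv, hnone]
  simp [h1l, h2l, h3l, h4l, h5l, h6l, h7l, pvIsList, hLl, pvIsPtr]

lemma pvMain (n : Nat) : ∀ cs : List Char, cs.length ≤ n → pvYamlA cs = pvYamlB cs := by
  induction n with
  | zero =>
    intro cs h
    have hnil : cs = [] := by cases cs <;> simp_all
    subst hnil
    exact pvBase [] (by decide)
  | succ n ih =>
    intro cs hlen
    by_cases hL : PySem.Chars.startswith cs "List".toList = true
    · -- a list-wrapper layer: A recurses, B peels one loop iteration
      have hLl : PySem.Chars.startswith cs ['L','i','s','t'] = true := hL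
      have hp : ("List".toList : List Char) <+: cs := (PySem.Chars.startswith_iff _ _).mp hL
      have hne : ∀ k : List Char, ¬ (("List".toList : List Char) <+: k) → cs ≠ k := by
        intro k hk he; exact hk (he ▸ hp)
      set inner := PySem.Chars.slice cs (some 5) (some (-1)) with hinner
      have hinner' : PySem.List.slice cs (some 5) (some (-1)) = inner := rfl
      have hlt : inner.length < cs.length := pvSliceLen_lt cs hL
      have hA : pvYamlA cs = "std::vector<".toList ++ pvYamlA inner ++ ">".toList := by
        rw [pvYamlA.eq_def]
        simp [hne ['f','l','o','a','t'] (by decide), hne ['s','t','r'] (by decide),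
          hne ['i','n','t'] (by decide), hne ['l','o','n','g'] (by decide),
          hne ['V','e','c','2'] (by decide), hne ['V','e','c','3'] (by decide),
          hne ['I','V','e','c','3'] (by decide), pvIsList, hLl, pvInner, hinner']
      have hpeel : pvPeel cs = ((pvPeel inner).1, (pvPeel inner).2 + 1) := by
        rw [pvPeel.eq_def]; simp [hLl, hinner']
      have hB : pvYamlB cs = "std::vector<".toList ++ pvYamlB inner ++ ">".toList := by
        simp only [pvYamlB, hpeel]
        exact pvWrapSucc _ _ _ _
      rw [hA, hB, ih inner (by omega)]
    · exact pvBase cs (eq_false_of_ne_true hL)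

-- ===== VERDICT (by name: the statement is the Claim_ definition above) =====
theorem yaml_type_to_cpp_type_spec : Claim_equal_yaml_type_to_cpp_type := by
  intro t _ _
  unfold Spec_yaml_type_to_cpp_type yaml_type_to_cpp_type yaml_type_to_cpp_type_alt
  rw [pvMain t.toList.length t.toList le_rfl]
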